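-- pv_equiv track=rewrite | github.com/pyupio/safety | safety/tool/interceptors/windows.py | _tokenize_autorun
-- ===== SOURCE A (Python) =====
-- from typing import TYPE_CHECKING, Dict, List
--
-- def _tokenize_autorun(autorun_value: str) -> List[str]:
--     """
--     Tokenize AutoRun value preserving commands, separators, and spacing.
--     Simple character-by-character parsing approach.
--     """
--     if not autorun_value:
--         return []
--
--     tokens = []
--     current_token = ""
--     i = 0
--
--     while i < len(autorun_value):
--         char = autorun_value[i]
--
--         if char in "&|":
--             # Save current token if exists
--             if current_token:
--                 tokens.append(current_token)
--                 current_token = ""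
--
--             # Handle double operators (&&, ||)
--             if i + 1 < len(autorun_value) and autorun_value[i + 1] == char:
--                 tokens.append(char + char)  # && or ||
--                 i += 2
--             else:
--                 tokens.append(char)  # & or |
--                 i += 1
--         else:
--             current_token += char
--             i += 1
--
--     if current_token:
--         tokens.append(current_token)
--
--     return tokens
-- ===== SOURCE B (Python) =====
-- def _runs(s, key):
--     """Split s into maximal substrings on which key is constant."""
--     runs = []
--     i = 0
--     while i < len(s):
--         j = i + 1
--         while j < len(s) and key(s[j]) == key(s[i]):
--             j += 1
--         runs.append(s[i:j])
--         i = j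
--     return runs
--
--
-- def _tokenize_autorun(autorun_value):
--     """Run-length tokenization: split into operator/non-operator runs, then
--     emit operator runs pairwise (&& / || per pair, single leftover)."""
--     tokens = []
--     for run in _runs(autorun_value, lambda c: c in "&|"):
--         if run[0] in "&|":
--             for sub in _runs(run, lambda c: c):
--                 ch = sub[0]
--                 pairs, odd = divmod(len(sub), 2)
--                 tokens.extend([ch + ch] * pairs)
--                 if odd:
--                     tokens.append(ch)
--         else:
--             tokens.append(run)
--     return tokens
-- ===== Notes on version B (the rewrite author's own statement) =====
-- stated objective: faster
-- what changed: Replaces A's index/lookahead character loop with per-character string concatenation by a run-length decomposition: split the string into maximal operator/non-operator runs via slicing, emit each non-operator run as one token and each equal-character operator run arithmetically (len//2 double-operator tokens plus an optional single).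
import Mathlib
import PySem

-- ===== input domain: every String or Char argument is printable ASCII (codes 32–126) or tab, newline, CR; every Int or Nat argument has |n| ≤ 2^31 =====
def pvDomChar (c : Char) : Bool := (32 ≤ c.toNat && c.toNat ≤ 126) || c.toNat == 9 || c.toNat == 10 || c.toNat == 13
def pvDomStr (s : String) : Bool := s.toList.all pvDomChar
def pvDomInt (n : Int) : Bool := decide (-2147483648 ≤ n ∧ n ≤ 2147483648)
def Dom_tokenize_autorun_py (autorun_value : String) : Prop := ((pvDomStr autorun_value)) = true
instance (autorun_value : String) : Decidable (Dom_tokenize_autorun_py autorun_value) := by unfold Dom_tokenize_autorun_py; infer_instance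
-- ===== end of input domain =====

-- B replaces A's index/lookahead loop (with per-character token concatenation)
-- by a run-length decomposition: maximal operator/non-operator runs taken by
-- slicing, operator runs emitted arithmetically; measurably faster on large inputs.

-- shared tiny helper: Python's `char in "&|"`
def pvIsOp (c : Char) : Bool := c = '&' || c = '|'

-- ===== PORT A =====
-- A's while-loop: remaining chars, accumulated `tokens`, current token (as List Char).
def tokA_go : List Char → List String → List Char → List String
  | [], tokens, cur => if cur ≠ [] then tokens ++ [String.mk cur] else tokens
  | c :: rest, tokens, cur =>
    if pvIsOp c then
      -- save current token if exists
      let tokens1 := if cur ≠ [] then tokens ++ [String.mk cur] else tokens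
      match rest with
      | c' :: rest' =>
        if c' = c then tokA_go rest' (tokens1 ++ [String.mk [c, c]]) []   -- double operator
        else tokA_go (c' :: rest') (tokens1 ++ [String.mk [c]]) []        -- single operator
      | [] => tokens1 ++ [String.mk [c]]                                  -- single operator at end
    else tokA_go rest tokens (cur ++ [c])
termination_by cs _ _ => cs.length

def tokenize_autorun_py (autorun_value : String) : List String :=
  if autorun_value = "" then []
  else tokA_go autorun_value.toList [] []

-- ===== PORT B =====
-- B's `_runs`: maximal runs on which `key` is constant.
def pvRuns {α : Type} [DecidableEq α] (key : Char → α) : List Char → List (List Char)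
  | [] => []
  | c :: cs =>
    (c :: cs.takeWhile (fun d => decide (key d = key c)))
      :: pvRuns key (cs.dropWhile (fun d => decide (key d = key c)))
termination_by l => l.length
decreasing_by
  exact Nat.lt_succ_of_le (List.length_dropWhile_le _ _)

-- B's inner loop over an operator run: equal-char sub-runs, pairs + optional single.
def pvEmitOps (run : List Char) : List String :=
  (pvRuns (fun c => c) run).flatMap fun sub =>
    List.replicate (sub.length / 2) (String.mk [sub.headD ' ', sub.headD ' ']) ++
    (if sub.length % 2 = 1 then [String.mk [sub.headD ' ']] else [])

def tokenize_autorun_py_alt (autorun_value : String) : List String :=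
  (pvRuns pvIsOp autorun_value.toList).flatMap fun run =>
    if pvIsOp (run.headD ' ') then pvEmitOps run else [String.mk run]

-- ===== PRECONDITION & SPEC =====
def Spec_tokenize_autorun_py (autorun_value : String) (out : List String) : Prop := out = tokenize_autorun_py_alt autorun_value
instance (autorun_value : String) (out : List String) : Decidable (Spec_tokenize_autorun_py autorun_value out) := by unfold Spec_tokenize_autorun_py; infer_instance

-- ===== CLAIM (what is proved, stated in full; the proofs are below) =====
def Claim_equal_tokenize_autorun_py : Prop := ∀ (autorun_value : String), Dom_tokenize_autorun_py autorun_value → Spec_tokenize_autorun_py autorun_value (tokenize_autorun_py autorun_value)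

-- ===== LEMMAS AND PROOFS =====

theorem head?_dropWhile_false {p : Char → Bool} {l : List Char} {a : Char}
    (h : (l.dropWhile p).head? = some a) : p a = false := by
  induction l with
  | nil => simp at h
  | cons b t ih =>
    rw [List.dropWhile_cons] at h
    by_cases hb : p b
    · rw [if_pos hb] at h; exact ih h
    · rw [if_neg hb] at h
      simp at h
      rw [← h]
      exact Bool.not_eq_true _ ▸ (by simpa using hb)

-- one-step unfolding lemmas for A's loop
theorem tokA_go_nil (tokens : List String) (cur : List Char) :
    tokA_go [] tokens cur = if cur ≠ [] then tokens ++ [String.mk cur] else tokens := by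
  rw [tokA_go]

theorem tokA_go_op_last {c : Char} (hc : pvIsOp c = true) (tokens : List String) (cur : List Char) :
    tokA_go [c] tokens cur =
      (if cur ≠ [] then tokens ++ [String.mk cur] else tokens) ++ [String.mk [c]] := by
  rw [tokA_go]; simp [hc]

theorem tokA_go_op_pair {c c' : Char} (hc : pvIsOp c = true) (he : c' = c)
    (rest' : List Char) (tokens : List String) (cur : List Char) :
    tokA_go (c :: c' :: rest') tokens cur =
      tokA_go rest' ((if cur ≠ [] then tokens ++ [String.mk cur] else tokens) ++ [String.mk [c, c]]) [] := by
  rw [tokA_go]; simp [hc, he]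

theorem tokA_go_op_single {c c' : Char} (hc : pvIsOp c = true) (he : c' ≠ c)
    (rest' : List Char) (tokens : List String) (cur : List Char) :
    tokA_go (c :: c' :: rest') tokens cur =
      tokA_go (c' :: rest') ((if cur ≠ [] then tokens ++ [String.mk cur] else tokens) ++ [String.mk [c]]) [] := by
  rw [tokA_go]; simp [hc, he]

theorem tokA_go_nonop {c : Char} (hc : pvIsOp c = false)
    (rest : List Char) (tokens : List String) (cur : List Char) :
    tokA_go (c :: rest) tokens cur = tokA_go rest tokens (cur ++ [c]) := by
  rw [tokA_go]; simp [hc]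

-- A's loop only ever appends to `tokens`.
theorem tokA_acc : ∀ (n : ℕ) (cs : List Char), cs.length ≤ n →
    ∀ tokens cur, tokA_go cs tokens cur = tokens ++ tokA_go cs [] cur := by
  intro n
  induction n with
  | zero =>
    intro cs hcs tokens cur
    have : cs = [] := List.eq_nil_of_length_eq_zero (Nat.le_zero.mp hcs)
    subst this
    by_cases h : cur = [] <;> simp [tokA_go_nil, h]
  | succ n ih =>
    intro cs hcs tokens cur
    cases cs with
    | nil => by_cases h : cur = [] <;> simp [tokA_go_nil, h]
    | cons c rest =>
      by_cases hc : pvIsOp c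
      · cases rest with
        | nil =>
          rw [tokA_go_op_last hc, tokA_go_op_last hc]
          by_cases h : cur = [] <;> simp [h]
        | cons c' rest' =>
          by_cases he : c' = c
          · have h1 : rest'.length ≤ n := by simp at hcs; omega
            rw [tokA_go_op_pair hc he, tokA_go_op_pair hc he, ih rest' h1]
            conv_rhs => rw [ih rest' h1]
            by_cases h : cur = [] <;> simp [h]
          · have h1 : (c' :: rest').length ≤ n := by simp at hcs ⊢; omega
            rw [tokA_go_op_single hc he, tokA_go_op_single hc he, ih (c' :: rest') h1]
            conv_rhs => rw [ih (c' :: rest') h1]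
            by_cases h : cur = [] <;> simp [h]
      · have hcf : pvIsOp c = false := Bool.not_eq_true _ ▸ (by simpa using hc)
        have h1 : rest.length ≤ n := by simp at hcs; omega
        rw [tokA_go_nonop hcf, tokA_go_nonop hcf]
        exact ih rest h1 tokens (cur ++ [c])

-- Consuming a non-operator chunk just extends the current token.
theorem tokA_nonop : ∀ (t : List Char), (∀ c ∈ t, pvIsOp c = false) →
    ∀ rest cur, tokA_go (t ++ rest) [] cur = tokA_go rest [] (cur ++ t) := by
  intro t
  induction t with
  | nil => intro _ rest cur; simp
  | cons c t' ih =>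
    intro h rest cur
    have hc : pvIsOp c = false := h c (by simp)
    have ht' : ∀ d ∈ t', pvIsOp d = false := fun d hd => h d (by simp [hd])
    simp only [List.cons_append]
    rw [tokA_go_nonop hc, ih ht' rest (cur ++ [c])]
    simp

-- At an operator (or at the end), a pending current token is flushed first.
theorem tokA_flush : ∀ (cs : List Char), (cs = [] ∨ ∃ c rest, cs = c :: rest ∧ pvIsOp c = true) →
    ∀ cur, tokA_go cs [] cur = (if cur ≠ [] then [String.mk cur] else []) ++ tokA_go cs [] [] := by
  intro cs hcs cur
  rcases hcs with h | ⟨c, rest, rfl, hc⟩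
  · subst h; by_cases h : cur = [] <;> simp [tokA_go_nil, h]
  · cases rest with
    | nil =>
      rw [tokA_go_op_last hc, tokA_go_op_last hc]
      by_cases h : cur = [] <;> simp [h]
    | cons c' rest' =>
      by_cases he : c' = c
      · rw [tokA_go_op_pair hc he, tokA_go_op_pair hc he,
            tokA_acc rest'.length rest' le_rfl]
        conv_rhs => rw [tokA_acc rest'.length rest' le_rfl]
        by_cases h : cur = [] <;> simp [h]
      · rw [tokA_go_op_single hc he, tokA_go_op_single hc he,
            tokA_acc (c' :: rest').length (c' :: rest') le_rfl]
        conv_rhs => rw [tokA_acc (c' :: rest').length (c' :: rest') le_rfl]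
        by_cases h : cur = [] <;> simp [h]

-- A run of n equal operator characters yields n/2 doubles and n%2 singles.
theorem tokA_oprun (c : Char) (hc : pvIsOp c = true) :
    ∀ (n : ℕ) (rest : List Char), rest.head? ≠ some c →
      tokA_go (List.replicate n c ++ rest) [] [] =
        (List.replicate (n / 2) (String.mk [c, c]) ++
          (if n % 2 = 1 then [String.mk [c]] else [])) ++ tokA_go rest [] [] := by
  intro n
  induction n using Nat.strong_induction_on with
  | _ n ih =>
    intro rest hrest
    match n with
    | 0 => simp
    | 1 =>
      cases rest with
      | nil => simp [tokA_go_op_last hc, tokA_go_nil]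
      | cons c' rest' =>
        have he : c' ≠ c := by intro h; exact hrest (by simp [h])
        simp only [List.replicate_succ, List.replicate_zero, List.cons_append, List.nil_append]
        rw [tokA_go_op_single hc he, tokA_acc (c' :: rest').length (c' :: rest') le_rfl]
        simp
    | (m + 2) =>
      have hrec := ih m (by omega) rest hrest
      have h2 : (m + 2) / 2 = m / 2 + 1 := by omega
      have h3 : (m + 2) % 2 = m % 2 := by omega
      simp only [List.replicate_succ, List.cons_append]
      rw [tokA_go_op_pair hc rfl,
          tokA_acc (List.replicate m c ++ rest).length _ le_rfl, hrec]
      simp [h2, h3, List.replicate_succ]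

-- elements of an equal-char takeWhile are that char
theorem takeWhile_eq_replicate (c : Char) (l : List Char) :
    c :: l.takeWhile (fun d => decide (d = c)) =
      List.replicate ((l.takeWhile (fun d => decide (d = c))).length + 1) c := by
  rw [List.eq_replicate_iff]
  constructor
  · simp
  · intro b hb
    rcases List.mem_cons.mp hb with h | h
    · exact h
    · have := List.mem_takeWhile_imp h
      simpa using this

-- A whole operator run is consumed into B's arithmetic emission.
theorem tokA_opblock : ∀ (k : ℕ) (u : List Char), u.length ≤ k →
    (∀ d ∈ u, pvIsOp d = true) →
    ∀ rest, (∀ d, rest.head? = some d → pvIsOp d = false) →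
      tokA_go (u ++ rest) [] [] = pvEmitOps u ++ tokA_go rest [] [] := by
  intro k
  induction k with
  | zero =>
    intro u hu _ rest _
    have : u = [] := List.eq_nil_of_length_eq_zero (Nat.le_zero.mp hu)
    subst this; simp [pvEmitOps, pvRuns]
  | succ k ih =>
    intro u hu hop rest hrest
    cases u with
    | nil => simp [pvEmitOps, pvRuns]
    | cons c u' =>
      have hc : pvIsOp c = true := hop c (by simp)
      set t := u'.takeWhile (fun d => decide (d = c)) with ht
      set r := u'.dropWhile (fun d => decide (d = c)) with hr
      have hsplit : u' = t ++ r := (List.takeWhile_append_dropWhile).symm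
      have hrep : c :: t = List.replicate (t.length + 1) c := takeWhile_eq_replicate c u'
      have hrhead : (r ++ rest).head? ≠ some c := by
        cases hrc : r with
        | nil =>
          simp only [List.nil_append]
          cases hrs : rest with
          | nil => simp
          | cons e rest' =>
            have hef : pvIsOp e = false := hrest e (by simp [hrs])
            simp only [List.head?_cons, ne_eq, Option.some.injEq]
            intro hec
            rw [hec] at hef
            rw [hef] at hc
            exact Bool.false_ne_true hc
        | cons e r' =>
          have hne : e ≠ c := by
            have := head?_dropWhile_false (p := fun d => decide (d = c)) (l := u') (a := e)
              (by rw [← hr, hrc]; rfl)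
            simpa using this
          simp [hne]
      have hul : u' ++ rest = t ++ (r ++ rest) := by rw [hsplit, List.append_assoc]
      have hstep : tokA_go ((c :: u') ++ rest) [] [] =
          tokA_go (List.replicate (t.length + 1) c ++ (r ++ rest)) [] [] := by
        rw [← hrep, List.cons_append, List.cons_append, hul]
      rw [hstep, tokA_oprun c hc (t.length + 1) (r ++ rest) hrhead]
      have hrlen : r.length ≤ k := by
        have h1 : r.length ≤ u'.length := List.length_dropWhile_le _ _
        simp at hu; omega
      have hropp : ∀ d ∈ r, pvIsOp d = true := by
        intro d hd
        have : d ∈ u' := by rw [hsplit]; simp [hd]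
        exact hop d (by simp [this])
      rw [ih r hrlen hropp rest hrest]
      have hemit : pvEmitOps (c :: u') =
          (List.replicate ((t.length + 1) / 2) (String.mk [c, c]) ++
            (if (t.length + 1) % 2 = 1 then [String.mk [c]] else [])) ++ pvEmitOps r := by
        simp only [pvEmitOps, pvRuns, List.flatMap_cons, List.headD_cons, List.length_cons]
        rfl
      rw [hemit]
      simp [List.append_assoc]

-- main loop equivalence
theorem tokAB_main : ∀ (k : ℕ) (cs : List Char), cs.length ≤ k →
    tokA_go cs [] [] =
      (pvRuns pvIsOp cs).flatMap fun run =>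
        if pvIsOp (run.headD ' ') then pvEmitOps run else [String.mk run] := by
  intro k
  induction k with
  | zero =>
    intro cs hcs
    have : cs = [] := List.eq_nil_of_length_eq_zero (Nat.le_zero.mp hcs)
    subst this; simp [tokA_go_nil, pvRuns]
  | succ k ih =>
    intro cs hcs
    cases cs with
    | nil => simp [tokA_go_nil, pvRuns]
    | cons c cs' =>
      set t := cs'.takeWhile (fun d => decide (pvIsOp d = pvIsOp c)) with ht
      set r := cs'.dropWhile (fun d => decide (pvIsOp d = pvIsOp c)) with hr
      have hsplit : cs' = t ++ r := (List.takeWhile_append_dropWhile).symm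
      have hteq : ∀ d ∈ t, pvIsOp d = pvIsOp c := by
        intro d hd
        have := List.mem_takeWhile_imp hd
        simpa using this
      have hrhead : ∀ d, r.head? = some d → pvIsOp d ≠ pvIsOp c := by
        intro d hd
        have : decide (pvIsOp d = pvIsOp c) = false :=
          head?_dropWhile_false (by rw [← hr]; exact hd)
        simpa using this
      have hrlen : r.length ≤ k := by
        have h1 : r.length ≤ cs'.length := List.length_dropWhile_le _ _
        simp at hcs; omega
      have hruns : pvRuns pvIsOp (c :: cs') = (c :: t) :: pvRuns pvIsOp r := by
        simp only [pvRuns]; rw [← ht, ← hr]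
      rw [hruns]
      by_cases hc : pvIsOp c
      · -- operator run
        have hop : ∀ d ∈ c :: t, pvIsOp d = true := by
          intro d hd
          rcases List.mem_cons.mp hd with h | h
          · rw [h]; exact hc
          · rw [hteq d h]; exact hc
        have hrh : ∀ d, r.head? = some d → pvIsOp d = false := by
          intro d hd
          have hne := hrhead d hd
          cases hdb : pvIsOp d
          · rfl
          · exact absurd (by rw [hdb, hc]) hne
        have hblock : tokA_go (c :: cs') [] [] = pvEmitOps (c :: t) ++ tokA_go r [] [] := by
          rw [hsplit]
          exact tokA_opblock (c :: t).length (c :: t) le_rfl hop r hrh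
        rw [hblock, ih r hrlen]
        simp [hc]
      · -- non-operator run
        have hcf : pvIsOp c = false := Bool.not_eq_true _ ▸ (by simpa using hc)
        have hnon : ∀ d ∈ c :: t, pvIsOp d = false := by
          intro d hd
          rcases List.mem_cons.mp hd with h | h
          · rw [h]; exact hcf
          · rw [hteq d h]; exact hcf
        have hstep : tokA_go (c :: cs') [] [] = tokA_go r [] (c :: t) := by
          rw [hsplit]
          exact tokA_nonop (c :: t) hnon r []
        have hrshape : r = [] ∨ ∃ e rest, r = e :: rest ∧ pvIsOp e = true := by
          cases hrc : r with
          | nil => exact Or.inl rfl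
          | cons e r' =>
            refine Or.inr ⟨e, r', rfl, ?_⟩
            have hne := hrhead e (by rw [hrc]; rfl)
            cases heb : pvIsOp e
            · exact absurd (by rw [heb, hcf]) hne
            · rfl
        rw [hstep, tokA_flush r hrshape (c :: t), ih r hrlen]
        simp [hcf]

-- ===== VERDICT (by name: the statement is the Claim_ definition above) =====
theorem tokenize_autorun_py_spec : Claim_equal_tokenize_autorun_py := by
  intro s _
  unfold Spec_tokenize_autorun_py tokenize_autorun_py tokenize_autorun_py_alt
  by_cases hs : s = ""
  · subst hs; simp [pvRuns]
  · rw [if_neg hs]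
    exact tokAB_main s.toList.length s.toList le_rfl
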